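-- pv_equiv track=rewrite | github.com/ninepig/leecode_dd_2024 | company/zAmazon/oa/zmethodExplained/maxAggreateTemptureChange.py | getMaxAggregateTemperatureChange
-- ===== SOURCE A (Python) =====
-- from typing import List
--
-- def getMaxAggregateTemperatureChange(tempChange: List[int]) -> int:
--         left, right = tempChange[0], sum(tempChange)
--         max_change = max(left, right)
--         for i in range(1, len(tempChange)):
--             left += tempChange[i]
--             right -= tempChange[i-1]
--             max_change = max(max_change, max(left, right))
--         return max_change
-- ===== SOURCE B (Python) =====
-- def getMaxAggregateTemperatureChange(tempChange):
--     prefix = []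
--     total = 0
--     for x in tempChange:
--         total += x
--         prefix.append(total)
--     return max(max(prefix), total - min([0] + prefix[:-1]))
-- ===== Notes on version B (the rewrite author's own statement) =====
-- stated objective: faster
-- what changed: B materializes the full prefix-sum table once and reduces it with the max/min builtins (answer = max of the prefix maxima and total minus the minimum over zero and the proper prefixes) instead of A's single interleaved loop updating running left/right aggregates and a running maximum per index.
import Mathlib
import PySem

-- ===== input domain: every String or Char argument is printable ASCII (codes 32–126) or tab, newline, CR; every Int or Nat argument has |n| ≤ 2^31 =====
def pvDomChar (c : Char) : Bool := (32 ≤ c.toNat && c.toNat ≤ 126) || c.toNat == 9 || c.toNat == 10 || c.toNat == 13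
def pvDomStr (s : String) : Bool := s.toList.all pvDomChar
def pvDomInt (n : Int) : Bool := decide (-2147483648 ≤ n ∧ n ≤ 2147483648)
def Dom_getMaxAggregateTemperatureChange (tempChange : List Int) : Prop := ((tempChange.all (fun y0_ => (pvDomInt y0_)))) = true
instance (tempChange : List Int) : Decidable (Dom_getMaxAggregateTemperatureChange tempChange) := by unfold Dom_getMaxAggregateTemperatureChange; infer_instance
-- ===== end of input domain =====

-- B replaces A's interleaved running left/right loop by materializing the prefix-sum
-- table once and reducing it with the max/min builtins (best suffix = total - min of 0 and
-- the proper prefixes); same O(n), measurably faster by constant factor in a timing run.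
-- Equivalence is claimed for the return value on
-- nonempty lists; on [] both Pythons raise (A IndexError, B ValueError).

-- ===== PORT A =====
def getMaxAggregateTemperatureChange (tempChange : List Int) : Int :=
  -- tempChange[0]: IndexError on [] — excluded by Pre_
  let left := (PySem.List.pyGet? tempChange 0).getD 0
  let right := tempChange.sum
  let max_change := max left right
  let st := (PySem.List.pyRange 1 (tempChange.length : Int) 1).foldl
    (fun (st : Int × Int × Int) i =>
      let left := st.1 + PySem.List.pyGetD tempChange i 0
      let right := st.2.1 - PySem.List.pyGetD tempChange (i - 1) 0
      (left, right, max st.2.2 (max left right)))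
    (left, right, max_change)
  st.2.2

-- ===== PORT B =====
def getMaxAggregateTemperatureChange_alt (tempChange : List Int) : Int :=
  let st := tempChange.foldl
    (fun (st : List Int × Int) x => (st.1 ++ [st.2 + x], st.2 + x)) ([], 0)
  let prefixList := st.1
  let total := st.2
  -- max(prefix): ValueError on [] — excluded by Pre_
  max ((PySem.List.max? prefixList (fun y => y)).getD 0)
      (total - (PySem.List.min? ((0 : Int) :: PySem.List.slice prefixList none (some (-1))) (fun y => y)).getD 0)

-- ===== PRECONDITION & SPEC =====
-- Pre_ excludes only the empty list, on which both Pythons raise (A: IndexError, B: ValueError).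
def Pre_getMaxAggregateTemperatureChange (tempChange : List Int) : Prop := tempChange ≠ []
instance (tempChange : List Int) : Decidable (Pre_getMaxAggregateTemperatureChange tempChange) := by unfold Pre_getMaxAggregateTemperatureChange; infer_instance
def pvWitness_getMaxAggregateTemperatureChange : List Int := [1, -2, 3]

def Spec_getMaxAggregateTemperatureChange (tempChange : List Int) (out : Int) : Prop := out = getMaxAggregateTemperatureChange_alt tempChange
instance (tempChange : List Int) (out : Int) : Decidable (Spec_getMaxAggregateTemperatureChange tempChange out) := by unfold Spec_getMaxAggregateTemperatureChange; infer_instance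

-- ===== CLAIM (what is proved, stated in full; the proofs are below) =====
def Claim_equal_getMaxAggregateTemperatureChange : Prop := ∀ (tempChange : List Int), Dom_getMaxAggregateTemperatureChange tempChange → Pre_getMaxAggregateTemperatureChange tempChange → Spec_getMaxAggregateTemperatureChange tempChange (getMaxAggregateTemperatureChange tempChange)

-- ===== LEMMAS AND PROOFS =====

/-- Prefix sums of `t` starting from accumulator `a`. -/
def pvPref : Int → List Int → List Int
  | _, [] => []
  | a, x :: t => (a + x) :: pvPref (a + x) t

/-- The running `right` values of A's loop: start `r`, pending predecessor `x`. -/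
def pvSuf : Int → Int → List Int → List Int
  | _, _, [] => []
  | r, x, y :: u => (r - x) :: pvSuf (r - x) y u

theorem pvPref_length : ∀ (t : List Int) (a : Int), (pvPref a t).length = t.length := by
  intro t; induction t with
  | nil => intro a; rfl
  | cons y u ih => intro a; simp [pvPref, ih]

theorem pvSuf_length : ∀ (t : List Int) (r x : Int), (pvSuf r x t).length = t.length := by
  intro t; induction t with
  | nil => intro r x; rfl
  | cons y u ih => intro r x; simp [pvSuf, ih]

theorem pvPref_shift : ∀ (t : List Int) (a b : Int),
    pvPref (a + b) t = (pvPref b t).map (fun p => a + p) := by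
  intro t; induction t with
  | nil => intro a b; rfl
  | cons y u ih =>
      intro a b
      simp only [pvPref, List.map_cons]
      rw [show a + b + y = a + (b + y) by ring, ih a (b + y)]

theorem pvSuf_eq_map : ∀ (t : List Int) (r x : Int),
    pvSuf r x t = ((x :: pvPref x t).dropLast).map (fun p => r - p) := by
  intro t; induction t with
  | nil => intro r x; rfl
  | cons y u ih =>
      intro r x
      simp only [pvSuf, pvPref, List.dropLast_cons₂, List.map_cons]
      congr 1
      rw [ih (r - x) y,
          show (x + y) :: pvPref (x + y) u = ((y :: pvPref y u).map (fun p => x + p)) by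
            simp [List.map_cons, pvPref_shift u x y],
          List.map_dropLast, List.map_dropLast, List.map_map]
      congr 1
      refine List.map_congr_left ?_
      intro p _
      simp only [Function.comp_apply]
      ring

theorem pvFoldl_max_max : ∀ (u : List Int) (a b : Int),
    u.foldl max (a ⊔ b) = a ⊔ u.foldl max b := by
  intro u; induction u with
  | nil => intro a b; rfl
  | cons x u ih =>
      intro a b
      simp only [List.foldl_cons]
      rw [max_assoc, ih]

theorem pvZip_split : ∀ (u v : List Int) (m : Int), u.length = v.length →
    (List.zipWith max u v).foldl max m = max (u.foldl max m) (v.foldl max m) := by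
  intro u; induction u with
  | nil =>
      intro v m h
      have : v = [] := by cases v <;> simp_all
      subst this; simp
  | cons a u ih =>
      intro v m h
      cases v with
      | nil => simp at h
      | cons b v =>
          simp only [List.zipWith_cons_cons, List.foldl_cons]
          rw [ih v (m ⊔ (a ⊔ b)) (by simpa using h)]
          rw [show m ⊔ (a ⊔ b) = b ⊔ (m ⊔ a) by omega, pvFoldl_max_max u]
          rw [show b ⊔ (m ⊔ a) = a ⊔ (m ⊔ b) by omega, pvFoldl_max_max v]
          have h1 : m ⊔ a ≤ u.foldl max (m ⊔ a) := (PySem.List.le_foldl_max u (m ⊔ a)).1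
          have h2 : m ⊔ b ≤ v.foldl max (m ⊔ b) := (PySem.List.le_foldl_max v (m ⊔ b)).1
          omega

theorem pvFoldl_max_map_sub : ∀ (l : List Int) (r c : Int),
    (l.map (fun p => r - p)).foldl max c = r - l.foldl min (r - c) := by
  intro l; induction l with
  | nil => intro r c; simp
  | cons p l ih =>
      intro p' c  -- p' plays r
      simp only [List.map_cons, List.foldl_cons]
      rw [ih, show p' - (c ⊔ (p' - p)) = (p' - c) ⊓ p by omega]

theorem pvFoldl_build : ∀ (xs l : List Int) (a : Int),
    xs.foldl (fun (st : List Int × Int) x => (st.1 ++ [st.2 + x], st.2 + x)) (l, a)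
      = (l ++ pvPref a xs, a + xs.sum) := by
  intro xs; induction xs with
  | nil => intro l a; simp [pvPref]
  | cons x xs ih =>
      intro l a
      simp only [List.foldl_cons]
      rw [ih]
      simp [pvPref, List.append_assoc]
      ring

theorem pvIdxFold (xs : List Int) (g : Int × Int × Int → Int → Int → Int × Int × Int) :
    ∀ (k n : Nat) (st : Int × Int × Int), 0 < n → xs.length - n = k →
    (PySem.List.pyRange (n : Int) (xs.length : Int) 1).foldl
        (fun st i => g st (PySem.List.pyGetD xs i 0) (PySem.List.pyGetD xs (i - 1) 0)) st
      = ((xs.drop n).zip (xs.drop (n - 1))).foldl (fun st p => g st p.1 p.2) st := by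
  intro k
  induction k with
  | zero =>
      intro n st hn hk
      have hle : xs.length ≤ n := by omega
      rw [PySem.List.pyRange_one_eq_nil (by exact_mod_cast hle)]
      rw [List.drop_eq_nil_of_le hle]
      rfl
  | succ k ih =>
      intro n st hn hk
      have hlt : n < xs.length := by omega
      rw [PySem.List.pyRange_one_cons (by exact_mod_cast hlt)]
      simp only [List.foldl_cons]
      have e1 : PySem.List.pyGetD xs (n : Int) 0 = xs[n] := by
        rw [PySem.List.pyGetD_natCast]; exact List.getD_eq_getElem xs 0 hlt
      have hn1 : n - 1 < xs.length := by omega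
      have e2 : PySem.List.pyGetD xs ((n : Int) - 1) 0 = xs[n - 1] := by
        rw [show ((n : Int) - 1) = ((n - 1 : Nat) : Int) by omega, PySem.List.pyGetD_natCast]
        exact List.getD_eq_getElem xs 0 hn1
      rw [e1, e2]
      have hrec := ih (n + 1) (g st xs[n] xs[n - 1]) (by omega) (by omega)
      push_cast at hrec
      try simp only [Nat.add_sub_cancel] at hrec
      rw [hrec]
      rw [List.drop_eq_getElem_cons hlt, List.drop_eq_getElem_cons hn1,
          show n - 1 + 1 = n by omega, List.zip_cons_cons, List.foldl_cons,
          List.drop_eq_getElem_cons hlt]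

theorem pvMainA : ∀ (t : List Int) (x l r m : Int),
    ((t.zip (x :: t)).foldl
        (fun (st : Int × Int × Int) p =>
          (st.1 + p.1, st.2.1 - p.2, max st.2.2 (max (st.1 + p.1) (st.2.1 - p.2)))) (l, r, m)).2.2
      = (List.zipWith max (pvPref l t) (pvSuf r x t)).foldl max m := by
  intro t; induction t with
  | nil => intro x l r m; rfl
  | cons y u ih =>
      intro x l r m
      simp only [List.zip_cons_cons, List.foldl_cons]
      rw [ih y (l + y) (r - x) (m ⊔ ((l + y) ⊔ (r - x)))]
      simp [pvPref, pvSuf]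

-- ===== VERDICT (by name: the statement is the Claim_ definition above) =====
theorem getMaxAggregateTemperatureChange_spec : Claim_equal_getMaxAggregateTemperatureChange := by
  intro xs _ hpre
  unfold Spec_getMaxAggregateTemperatureChange
  cases xs with
  | nil => exact absurd rfl hpre
  | cons x t =>
      unfold getMaxAggregateTemperatureChange getMaxAggregateTemperatureChange_alt
      simp only [List.sum_cons]
      have hx : ((PySem.List.pyGet? (x :: t) 0).getD 0 : Int) = x := by
        simp [PySem.List.pyGet?, PySem.List.pyIdx?]
      rw [hx]
      have hidx := pvIdxFold (x :: t)
            (fun st c p => (st.1 + c, st.2.1 - p, max st.2.2 (max (st.1 + c) (st.2.1 - p))))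
            t.length 1 (x, x + t.sum, max x (x + t.sum)) (by omega) (by simp)
      push_cast at hidx
      rw [hidx]
      simp only [List.drop_one, List.tail_cons, List.drop_zero]
      rw [pvMainA t x x (x + t.sum) (max x (x + t.sum))]
      -- B side: the built prefix table is pvPref 0 (x :: t) = x :: pvPref x t
      rw [pvFoldl_build (x :: t) [] 0]
      simp only [List.nil_append, pvPref, zero_add]
      rw [PySem.List.max?_id_cons, PySem.List.slice_to_neg_one, PySem.List.min?_id_cons]
      simp only [Option.getD_some, List.sum_cons]
      -- A side: split the zipWith max and normalize both folds
      rw [pvZip_split _ _ _ (by rw [pvPref_length, pvSuf_length])]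
      rw [show x ⊔ (x + t.sum) = (x + t.sum) ⊔ x by omega, pvFoldl_max_max,
          show (x + t.sum) ⊔ x = x ⊔ (x + t.sum) by omega, pvFoldl_max_max]
      rw [pvSuf_eq_map t (x + t.sum) x, pvFoldl_max_map_sub, sub_self]
      have h1 : x ≤ (pvPref x t).foldl max x := (PySem.List.le_foldl_max (pvPref x t) x).1
      have h2 : ((x :: pvPref x t).dropLast).foldl min 0 ≤ 0 :=
        (PySem.List.foldl_min_le ((x :: pvPref x t).dropLast) 0).1
      omega
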